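-- pv_equiv track=rewrite | github.com/corcarlotti/proteinortho_pangenome | proteinortho_visualization.py | build_color_dict
-- ===== SOURCE A (Python) =====
-- def build_color_dict(number_genomes, unique_bool):
--     str_for_strain = map(str, (range(1,(number_genomes)+1)))
--     colors = ['#1aa3ff','#99d6ff','#007acc']
--     if unique_bool:
--         color_array = [colors[0]]
--         for x in range(number_genomes-2):
--             color_array += [colors[1]]
--         color_array += [colors[2]]
--     else:
--         color_array = [colors[1]]
--         for x in range(number_genomes-2):
--             color_array += [colors[1]]
--         color_array += [colors[2]]
--     color_dict= dict(zip(str_for_strain, color_array))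
--     return (color_dict)
-- ===== SOURCE B (Python) =====
-- def build_color_dict(number_genomes, unique_bool):
--     colors = ['#1aa3ff', '#99d6ff', '#007acc']
--     first = colors[0] if unique_bool else colors[1]
--     return {
--         str(i): first if i == 1 else colors[2] if i == number_genomes else colors[1]
--         for i in range(1, number_genomes + 1)
--     }
-- ===== Notes on version B (the rewrite author's own statement) =====
-- stated objective: simpler
-- what changed: Replaces the branchy intermediate color_array list and the zip/dict construction with a single dict comprehension that picks each strain's color directly from its position (first / last / middle).
import Mathlib
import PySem

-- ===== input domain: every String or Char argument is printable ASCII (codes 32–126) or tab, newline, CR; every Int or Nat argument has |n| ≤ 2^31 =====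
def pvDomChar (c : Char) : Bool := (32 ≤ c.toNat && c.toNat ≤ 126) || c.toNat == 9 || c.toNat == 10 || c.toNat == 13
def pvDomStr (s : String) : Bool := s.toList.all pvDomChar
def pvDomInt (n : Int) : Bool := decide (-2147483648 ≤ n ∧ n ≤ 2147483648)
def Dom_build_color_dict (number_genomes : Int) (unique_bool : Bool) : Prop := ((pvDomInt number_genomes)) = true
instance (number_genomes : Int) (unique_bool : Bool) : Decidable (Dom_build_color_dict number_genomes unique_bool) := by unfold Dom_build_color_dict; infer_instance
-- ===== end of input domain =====

-- B replaces A's intermediate color_array list and zip/dict construction by one direct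
-- comprehension picking each strain's color from its position (simpler decomposition, same cost).

-- ===== PORT A =====
def build_color_dict (number_genomes : Int) (unique_bool : Bool) : List (String × String) :=
  let str_for_strain := (PySem.List.pyRange 1 (number_genomes + 1)).map PySem.Int.toStr
  let colors := ["#1aa3ff", "#99d6ff", "#007acc"]
  let color_array :=
    if unique_bool then
      ((PySem.List.pyRange 0 (number_genomes - 2)).foldl
        (fun acc _ => acc ++ [PySem.List.pyGetD colors 1 ""])
        [PySem.List.pyGetD colors 0 ""]) ++ [PySem.List.pyGetD colors 2 ""]
    else
      ((PySem.List.pyRange 0 (number_genomes - 2)).foldl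
        (fun acc _ => acc ++ [PySem.List.pyGetD colors 1 ""])
        [PySem.List.pyGetD colors 1 ""]) ++ [PySem.List.pyGetD colors 2 ""]
  (PySem.Dict.ofList (str_for_strain.zip color_array)).items

-- ===== PORT B =====
def build_color_dict_alt (number_genomes : Int) (unique_bool : Bool) : List (String × String) :=
  let colors := ["#1aa3ff", "#99d6ff", "#007acc"]
  let first := if unique_bool then PySem.List.pyGetD colors 0 "" else PySem.List.pyGetD colors 1 ""
  (PySem.List.pyRange 1 (number_genomes + 1)).map (fun i =>
    (PySem.Int.toStr i,
      if i == 1 then first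
      else if i == number_genomes then PySem.List.pyGetD colors 2 ""
      else PySem.List.pyGetD colors 1 ""))

-- ===== PRECONDITION & SPEC =====
def Spec_build_color_dict (number_genomes : Int) (unique_bool : Bool) (out : List (String × String)) : Prop := out = build_color_dict_alt number_genomes unique_bool
instance (number_genomes : Int) (unique_bool : Bool) (out : List (String × String)) : Decidable (Spec_build_color_dict number_genomes unique_bool out) := by unfold Spec_build_color_dict; infer_instance

-- ===== CLAIM (what is proved, stated in full; the proofs are below) =====
def Claim_equal_build_color_dict : Prop := ∀ (number_genomes : Int) (unique_bool : Bool), Dom_build_color_dict number_genomes unique_bool → Spec_build_color_dict number_genomes unique_bool (build_color_dict number_genomes unique_bool)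

-- ===== LEMMAS AND PROOFS =====

-- Decoding a decimal digit string back to the number it prints: used only to show str is injective.
def pvDecStep (a : Nat) (c : Char) : Nat := a * 10 + (c.toNat - 48)

-- reference value of folding pvDecStep over the digits of n starting from accumulator a
def pvG (a n : Nat) : Nat :=
  if h : n < 10 then a * 10 + n else pvG a (n / 10) * 10 + n % 10
decreasing_by exact Nat.div_lt_self (by omega) (by omega)

lemma pvG_zero (n : Nat) : pvG 0 n = n := by
  fun_induction pvG 0 n with
  | case1 n h => simp
  | case2 n h ih => rw [ih]; omega

lemma pv_digitChar_decode (d : Nat) (h : d < 10) : (Nat.digitChar d).toNat - 48 = d := by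
  interval_cases d <;> decide

lemma pv_toDigitsCore_decode (f : Nat) : ∀ (n : Nat) (acc : List Char) (a : Nat), n < 10 ^ f →
    (Nat.toDigitsCore 10 (f + 1) n acc).foldl pvDecStep a = acc.foldl pvDecStep (pvG a n) := by
  induction f with
  | zero =>
    intro n acc a hn
    have hn0 : n = 0 := by omega
    subst hn0
    rw [show Nat.toDigitsCore 10 1 0 acc = '0' :: acc from rfl]
    rw [pvG, dif_pos (by norm_num)]
    simp only [List.foldl]
    unfold pvDecStep
    norm_num [show '0'.toNat = 48 from rfl]
  | succ f ih =>
    intro n acc a hn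
    by_cases h0 : n / 10 = 0
    · have hlt : n < 10 := by omega
      simp only [Nat.toDigitsCore, h0, if_true, List.foldl]
      have : pvDecStep a (n % 10).digitChar = a * 10 + n := by
        unfold pvDecStep
        rw [pv_digitChar_decode (n % 10) (by omega)]
        omega
      rw [this, pvG, dif_pos hlt]
    · have hstep : Nat.toDigitsCore 10 (f + 1 + 1) n acc
          = Nat.toDigitsCore 10 (f + 1) (n / 10) ((n % 10).digitChar :: acc) := by
        conv_lhs => rw [Nat.toDigitsCore]
        simp only [h0, if_false]
      rw [hstep]
      have hdiv : n / 10 < 10 ^ f := by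
        have : n < 10 ^ (f + 1) := hn
        rw [pow_succ] at this
        omega
      rw [ih (n / 10) ((n % 10).digitChar :: acc) a hdiv]
      simp only [List.foldl]
      have hge : ¬ n < 10 := by omega
      conv_rhs => rw [pvG]
      rw [dif_neg hge]
      unfold pvDecStep
      rw [pv_digitChar_decode (n % 10) (by omega)]

lemma pv_toDigits_decode (n : Nat) : (Nat.toDigits 10 n).foldl pvDecStep 0 = n := by
  have hfuel : n < 10 ^ n := by
    rcases Nat.eq_zero_or_pos n with h | h
    · subst h; decide
    · exact Nat.lt_pow_self (by omega)
  have h := pv_toDigitsCore_decode n n [] 0 hfuel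
  simp only [Nat.toDigits] at h ⊢
  rw [h]
  simp [pvG_zero]

lemma pv_toDigits_inj (m n : Nat) (h : Nat.toDigits 10 m = Nat.toDigits 10 n) : m = n := by
  have := pv_toDigits_decode m
  rw [h, pv_toDigits_decode n] at this
  omega

lemma pv_toStr_inj_nonneg (a b : Int) (ha : 0 ≤ a) (hb : 0 ≤ b)
    (h : PySem.Int.toStr a = PySem.Int.toStr b) : a = b := by
  have hc : PySem.Int.toChars a = PySem.Int.toChars b := by
    have h' := congrArg String.toList h
    simp only [PySem.Int.toList_toStr] at h'
    exact h'
  unfold PySem.Int.toChars at hc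
  rw [if_neg (by omega), if_neg (by omega)] at hc
  have := pv_toDigits_inj a.toNat b.toNat hc
  omega

-- A's color_array, in closed form
lemma pv_colorArray_eq (n : Int) (first : String) :
    ((PySem.List.pyRange 0 (n - 2)).foldl (fun acc _ => acc ++ ["#99d6ff"]) [first]) ++ ["#007acc"]
      = ([first] ++ List.replicate (n - 2).toNat "#99d6ff") ++ ["#007acc"] := by
  rw [PySem.List.foldl_append_singleton_eq_map (fun _ => "#99d6ff")]
  congr 1
  congr 1
  rw [List.map_const']
  congr 1
  simpa using PySem.List.length_pyRange_one 0 (n - 2)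

lemma pv_strs_nodup (n : Int) :
    (((PySem.List.pyRange 1 (n + 1)).map PySem.Int.toStr)).Nodup := by
  apply List.Nodup.map_on
  · intro x hx y hy hxy
    rw [PySem.List.mem_pyRange_one] at hx hy
    exact pv_toStr_inj_nonneg x y (by omega) (by omega) hxy
  · exact PySem.List.nodup_pyRange_one 1 (n + 1)

lemma pv_len_strs (n : Int) : ((PySem.List.pyRange 1 (n + 1)).map PySem.Int.toStr).length = n.toNat := by
  simp [PySem.List.length_pyRange_one]

-- the central list identity: zipping the strain names with the closed-form color array
-- is the same list as B's direct comprehension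
lemma pv_zip_eq_map (n : Int) (first : String) :
    ((PySem.List.pyRange 1 (n + 1)).map PySem.Int.toStr).zip
        (([first] ++ List.replicate (n - 2).toNat "#99d6ff") ++ ["#007acc"])
      = (PySem.List.pyRange 1 (n + 1)).map (fun i =>
          (PySem.Int.toStr i, if i == 1 then first else if i == n then "#007acc" else "#99d6ff")) := by
  have hlenS : ((PySem.List.pyRange 1 (n + 1)).map PySem.Int.toStr).length = n.toNat := pv_len_strs n
  have hlenC : (([first] ++ List.replicate (n - 2).toNat "#99d6ff") ++ ["#007acc"]).length
      = (n - 2).toNat + 2 := by simp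
  have hle : n.toNat ≤ (n - 2).toNat + 2 := by omega
  apply List.ext_getElem
  · simp [hlenS, PySem.List.length_pyRange_one]
    omega
  · intro k h1 h2
    have hk : k < n.toNat := by
      simp only [List.length_zip, hlenS, hlenC] at h1
      omega
    have hkr : k < (PySem.List.pyRange 1 (n + 1)).length := by
      rw [PySem.List.length_pyRange_one]; omega
    rw [List.getElem_zip, List.getElem_map, List.getElem_map]
    have hval : (PySem.List.pyRange 1 (n + 1))[k] = 1 + (k : Int) :=
      PySem.List.getElem_pyRange_one 1 (n + 1) k hkr
    rw [hval]
    refine Prod.ext rfl ?_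
    simp only
    by_cases hk0 : k = 0
    · subst hk0
      simp
    · have hk1 : 1 ≤ k := by omega
      have hne1 : ((1 + (k : Int)) == 1) = false := by simp; omega
      simp only [hne1, Bool.false_eq_true, if_false]
      by_cases hlast : k = n.toNat - 1
      · -- last position: the "#007acc" appended at the end
        have hkn : ((1 + (k : Int)) == n) = true := by simp; omega
        simp only [hkn, if_true]
        have hkm : k = (n - 2).toNat + 1 := by omega
        subst hkm
        simp [List.getElem_cons_succ, List.getElem_append_right]
      · -- middle position: inside the replicate block
        have hkn : ((1 + (k : Int)) == n) = false := by simp; omega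
        simp only [hkn, Bool.false_eq_true, if_false]
        obtain ⟨j, rfl⟩ : ∃ j, k = j + 1 := ⟨k - 1, by omega⟩
        rw [List.getElem_append_left (by simp; omega)]
        rw [List.getElem_append_right (by simp)]
        simp

lemma pv_items_of_zip (n : Int) (ca : List String)
    (hlen : n.toNat ≤ ca.length) :
    (PySem.Dict.ofList (((PySem.List.pyRange 1 (n + 1)).map PySem.Int.toStr).zip ca)).items
      = ((PySem.List.pyRange 1 (n + 1)).map PySem.Int.toStr).zip ca := by
  have hfst : (((PySem.List.pyRange 1 (n + 1)).map PySem.Int.toStr).zip ca).map Prod.fst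
      = (PySem.List.pyRange 1 (n + 1)).map PySem.Int.toStr := by
    apply List.map_fst_zip
    rw [pv_len_strs n]; exact hlen
  have hnodup : ((((PySem.List.pyRange 1 (n + 1)).map PySem.Int.toStr).zip ca).map Prod.fst).Nodup := by
    rw [hfst]; exact pv_strs_nodup n
  have := PySem.Dict.items_foldl_insert_fresh
    ((((PySem.List.pyRange 1 (n + 1)).map PySem.Int.toStr)).zip ca)
    Prod.fst Prod.snd (PySem.Dict.empty)
    (fun a _ => PySem.Dict.contains_empty a.1) hnodup
  calc (PySem.Dict.ofList (((PySem.List.pyRange 1 (n + 1)).map PySem.Int.toStr).zip ca)).items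
      = (((((PySem.List.pyRange 1 (n + 1)).map PySem.Int.toStr)).zip ca).foldl
          (fun d a => d.insert a.1 a.2) PySem.Dict.empty).items := rfl
    _ = _ := by rw [this]; simp [PySem.Dict.empty]

-- ===== VERDICT (by name: the statement is the Claim_ definition above) =====
theorem build_color_dict_spec : Claim_equal_build_color_dict := by
  intro n u _
  unfold Spec_build_color_dict build_color_dict build_color_dict_alt
  dsimp only
  have hgd0 : PySem.List.pyGetD ["#1aa3ff", "#99d6ff", "#007acc"] 0 "" = "#1aa3ff" := by decide
  have hgd1 : PySem.List.pyGetD ["#1aa3ff", "#99d6ff", "#007acc"] 1 "" = "#99d6ff" := by decide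
  have hgd2 : PySem.List.pyGetD ["#1aa3ff", "#99d6ff", "#007acc"] 2 "" = "#007acc" := by decide
  rw [hgd0, hgd1, hgd2]
  cases u
  · simp only [Bool.false_eq_true, if_false]
    rw [pv_colorArray_eq n "#99d6ff"]
    rw [pv_items_of_zip n _ (by simp; omega)]
    exact pv_zip_eq_map n "#99d6ff"
  · simp only [if_true]
    rw [pv_colorArray_eq n "#1aa3ff"]
    rw [pv_items_of_zip n _ (by simp; omega)]
    exact pv_zip_eq_map n "#1aa3ff"
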